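-- pv_equiv track=rewrite | github.com/kristenmartino/regrag | apps/ingest/src/regrag_ingest/chunk.py | _merge_undersize
-- ===== SOURCE A (Python) =====
-- def estimate_tokens(text: str) -> int:
--     return max(1, len(text) // 4)
--
-- def _merge_undersize(
--     candidates: list[tuple[str, str, list[int]]],
--     min_tokens: int,
--     max_tokens: int,
-- ) -> list[tuple[str, str, list[int]]]:
--     """Greedy merge of consecutive small candidates while staying under max."""
--     merged: list[tuple[str, str, list[int]]] = []
--     i = 0
--     while i < len(candidates):
--         label, text, paras = candidates[i]
--         while estimate_tokens(text) < min_tokens and i + 1 < len(candidates):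
--             n_label, n_text, n_paras = candidates[i + 1]
--             combined = text + "\n\n" + n_text
--             if estimate_tokens(combined) > max_tokens:
--                 break
--             text = combined
--             paras = list(paras) + list(n_paras)
--             i += 1
--         merged.append((label, text, paras))
--         i += 1
--     return merged
-- ===== SOURCE B (Python) =====
-- def estimate_tokens(text: str) -> int:
--     return max(1, len(text) // 4)
--
-- def _merge_undersize(candidates, min_tokens, max_tokens):
--     """Single forward pass: merge each small chunk into the last emitted group."""
--     merged = []
--     for label, text, paras in candidates:
--         if merged:
--             p_label, p_text, p_paras = merged[-1]
--             combined = p_text + "\n\n" + text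
--             if estimate_tokens(p_text) < min_tokens and estimate_tokens(combined) <= max_tokens:
--                 merged[-1] = (p_label, combined, list(p_paras) + list(paras))
--                 continue
--         merged.append((label, text, paras))
--     return merged
-- ===== Notes on version B (the rewrite author's own statement) =====
-- stated objective: simpler
-- what changed: A's index-driven outer while loop with a nested absorption while loop is replaced by a single forward pass that either merges each chunk into the last emitted group or appends it as a new group.
import Mathlib
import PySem

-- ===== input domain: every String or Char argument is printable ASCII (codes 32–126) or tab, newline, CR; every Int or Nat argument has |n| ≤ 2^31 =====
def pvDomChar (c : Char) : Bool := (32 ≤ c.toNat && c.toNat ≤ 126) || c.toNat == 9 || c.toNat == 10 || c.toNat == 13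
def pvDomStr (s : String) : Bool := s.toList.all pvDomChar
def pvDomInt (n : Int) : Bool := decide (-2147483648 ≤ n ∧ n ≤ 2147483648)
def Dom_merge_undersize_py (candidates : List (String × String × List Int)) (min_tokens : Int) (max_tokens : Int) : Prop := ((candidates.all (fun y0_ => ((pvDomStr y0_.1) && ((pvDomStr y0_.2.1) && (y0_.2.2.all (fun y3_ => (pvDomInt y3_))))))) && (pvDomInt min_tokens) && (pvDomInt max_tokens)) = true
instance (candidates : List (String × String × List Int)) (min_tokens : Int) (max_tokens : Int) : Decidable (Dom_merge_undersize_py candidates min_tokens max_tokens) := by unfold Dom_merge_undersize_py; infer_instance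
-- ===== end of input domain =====

-- B replaces A's index-driven outer-while + inner absorption-while with one forward
-- pass over the chunks that merges each chunk into the last emitted group (objective:
-- simpler, same cost).

-- ===== PORT A =====
-- estimate_tokens(text) = max(1, len(text) // 4)
def pvEst (s : String) : Int := max 1 (PySem.Int.floordiv (PySem.Str.len s) 4)

-- inner 'while estimate_tokens(text) < min_tokens and i + 1 < len(candidates)' loop of A:
-- state (text, paras, remaining candidates after position i); returns the final state.
def pvInnerA (mn mx : Int) : String → List Int → List (String × String × List Int) →
    String × List Int × List (String × String × List Int)
  | text, paras, [] => (text, paras, [])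
  | text, paras, (n_label, n_text, n_paras) :: rest =>
    if pvEst text < mn then
      if pvEst (text ++ "\n\n" ++ n_text) > mx then (text, paras, (n_label, n_text, n_paras) :: rest)
      else pvInnerA mn mx (text ++ "\n\n" ++ n_text) (paras ++ n_paras) rest
    else (text, paras, (n_label, n_text, n_paras) :: rest)

-- (used by pvOuterA's termination proof)
theorem pvInnerA_len (mn mx : Int) (text : String) (paras : List Int)
    (rest : List (String × String × List Int)) :
    (pvInnerA mn mx text paras rest).2.2.length ≤ rest.length := by
  induction rest generalizing text paras with
  | nil => simp [pvInnerA]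
  | cons c rest ih =>
    obtain ⟨nl, nt, np⟩ := c
    simp only [pvInnerA]
    split_ifs
    · simp
    · exact le_trans (ih _ _) (by simp)
    · simp

-- outer 'while i < len(candidates)' loop of A, over the remaining suffix of candidates.
def pvOuterA (mn mx : Int) : List (String × String × List Int) →
    List (String × String × List Int) → List (String × String × List Int)
  | [], merged => merged
  | (label, text, paras) :: rest, merged =>
    let r := pvInnerA mn mx text paras rest
    pvOuterA mn mx r.2.2 (merged ++ [(label, r.1, r.2.1)])
termination_by rest _ => rest.length
decreasing_by
  simpa using Nat.lt_succ_of_le (pvInnerA_len mn mx text paras rest)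

def merge_undersize_py (candidates : List (String × String × List Int)) (min_tokens : Int) (max_tokens : Int) : List (String × String × List Int) :=
  pvOuterA min_tokens max_tokens candidates []

-- ===== PORT B =====
-- one step of B's forward pass: merge c into merged's last group or append it.
def pvStepB (mn mx : Int) (merged : List (String × String × List Int))
    (c : String × String × List Int) : List (String × String × List Int) :=
  match merged.getLast? with
  | some (p_label, p_text, p_paras) =>
    if pvEst p_text < mn ∧ pvEst (p_text ++ "\n\n" ++ c.2.1) ≤ mx then
      merged.dropLast ++ [(p_label, p_text ++ "\n\n" ++ c.2.1, p_paras ++ c.2.2)]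
    else merged ++ [c]
  | none => merged ++ [c]

def merge_undersize_py_alt (candidates : List (String × String × List Int)) (min_tokens : Int) (max_tokens : Int) : List (String × String × List Int) :=
  candidates.foldl (pvStepB min_tokens max_tokens) []

-- ===== PRECONDITION & SPEC =====
def Spec_merge_undersize_py (candidates : List (String × String × List Int)) (min_tokens : Int) (max_tokens : Int) (out : List (String × String × List Int)) : Prop := out = merge_undersize_py_alt candidates min_tokens max_tokens
instance (candidates : List (String × String × List Int)) (min_tokens : Int) (max_tokens : Int) (out : List (String × String × List Int)) : Decidable (Spec_merge_undersize_py candidates min_tokens max_tokens out) := by unfold Spec_merge_undersize_py; infer_instance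

-- ===== CLAIM (what is proved, stated in full; the proofs are below) =====
def Claim_equal_merge_undersize_py : Prop := ∀ (candidates : List (String × String × List Int)) (min_tokens : Int) (max_tokens : Int), Dom_merge_undersize_py candidates min_tokens max_tokens → Spec_merge_undersize_py candidates min_tokens max_tokens (merge_undersize_py candidates min_tokens max_tokens)

-- ===== LEMMAS AND PROOFS =====

-- B's fold, run over the whole of rest with an open last group (label,text,paras),
-- first performs exactly the merges of A's inner loop and then folds the remainder.
theorem pvStepB_inner (mn mx : Int) (rest : List (String × String × List Int))
    (text : String) (paras : List Int) (label : String)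
    (acc : List (String × String × List Int)) :
    rest.foldl (pvStepB mn mx) (acc ++ [(label, text, paras)]) =
      (pvInnerA mn mx text paras rest).2.2.foldl (pvStepB mn mx)
        (acc ++ [(label, (pvInnerA mn mx text paras rest).1,
                  (pvInnerA mn mx text paras rest).2.1)]) := by
  induction rest generalizing text paras acc with
  | nil => simp [pvInnerA]
  | cons c rest ih =>
    obtain ⟨nl, nt, np⟩ := c
    by_cases h1 : pvEst text < mn
    · by_cases h2 : pvEst (text ++ "\n\n" ++ nt) > mx
      · simp [pvInnerA, h1, h2]
      · have hstep : pvStepB mn mx (acc ++ [(label, text, paras)]) (nl, nt, np) =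
            acc ++ [(label, text ++ "\n\n" ++ nt, paras ++ np)] := by
          simp [pvStepB, h1, le_of_not_gt h2]
        simp only [pvInnerA, h1, if_true, h2, if_false, List.foldl_cons, hstep]
        exact ih _ _ _
    · simp [pvInnerA, h1]

-- A's inner loop stops only when B's merge condition on the next chunk fails.
theorem pvInnerA_stop (mn mx : Int) (rest : List (String × String × List Int))
    (text : String) (paras : List Int) (m : String × String × List Int)
    (rest' : List (String × String × List Int))
    (h : (pvInnerA mn mx text paras rest).2.2 = m :: rest') :
    ¬ (pvEst (pvInnerA mn mx text paras rest).1 < mn ∧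
       pvEst ((pvInnerA mn mx text paras rest).1 ++ "\n\n" ++ m.2.1) ≤ mx) := by
  induction rest generalizing text paras with
  | nil => simp [pvInnerA] at h
  | cons c rest ih =>
    obtain ⟨nl, nt, np⟩ := c
    by_cases h1 : pvEst text < mn
    · by_cases h2 : pvEst (text ++ "\n\n" ++ nt) > mx
      · simp only [pvInnerA, h1, if_true, h2] at h ⊢
        injection h with hm _
        subst hm
        rintro ⟨_, hle⟩
        dsimp only at hle
        omega
      · simp only [pvInnerA, h1, if_true, h2, if_false] at h ⊢
        exact ih _ _ h
    · simp only [pvInnerA, h1, if_false] at h ⊢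
      injection h with hm _
      subst hm
      rintro ⟨hlt, _⟩
      exact hlt

-- A's outer loop equals B's fold whenever the accumulator's last group cannot absorb
-- the head of the remaining input.
theorem pvOuterA_eq_foldl (mn mx : Int) (n : Nat) :
    ∀ (rest acc : List (String × String × List Int)), rest.length ≤ n →
    (∀ x, acc.getLast? = some x → ∀ m rest'', rest = m :: rest'' →
        ¬ (pvEst x.2.1 < mn ∧ pvEst (x.2.1 ++ "\n\n" ++ m.2.1) ≤ mx)) →
    pvOuterA mn mx rest acc = rest.foldl (pvStepB mn mx) acc := by
  induction n with
  | zero =>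
    intro rest acc hlen _
    have : rest = [] := List.length_eq_zero_iff.mp (Nat.le_zero.mp hlen)
    subst this; simp [pvOuterA]
  | succ n ih =>
    intro rest acc hlen hcl
    match rest with
    | [] => simp [pvOuterA]
    | (label, text, paras) :: rest' =>
      have hstep : pvStepB mn mx acc (label, text, paras) = acc ++ [(label, text, paras)] := by
        cases hg : acc.getLast? with
        | none => simp [pvStepB, hg]
        | some x =>
          obtain ⟨xl, xt, xp⟩ := x
          have := hcl _ hg (label, text, paras) rest' rfl
          simp only [pvStepB, hg]
          rw [if_neg this]
      have hlen' : (pvInnerA mn mx text paras rest').2.2.length ≤ n := by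
        have := pvInnerA_len mn mx text paras rest'
        simp at hlen; omega
      have hcl' : ∀ x, (acc ++ [(label, (pvInnerA mn mx text paras rest').1,
            (pvInnerA mn mx text paras rest').2.1)]).getLast? = some x →
          ∀ m rest'', (pvInnerA mn mx text paras rest').2.2 = m :: rest'' →
          ¬ (pvEst x.2.1 < mn ∧ pvEst (x.2.1 ++ "\n\n" ++ m.2.1) ≤ mx) := by
        intro x hx m rest'' hr
        rw [List.getLast?_concat] at hx
        obtain rfl := Option.some.inj hx
        exact pvInnerA_stop mn mx rest' text paras m rest'' hr
      calc pvOuterA mn mx ((label, text, paras) :: rest') acc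
          = pvOuterA mn mx (pvInnerA mn mx text paras rest').2.2
              (acc ++ [(label, (pvInnerA mn mx text paras rest').1,
                        (pvInnerA mn mx text paras rest').2.1)]) := by
            rw [pvOuterA]
        _ = (pvInnerA mn mx text paras rest').2.2.foldl (pvStepB mn mx)
              (acc ++ [(label, (pvInnerA mn mx text paras rest').1,
                        (pvInnerA mn mx text paras rest').2.1)]) := ih _ _ hlen' hcl'
        _ = rest'.foldl (pvStepB mn mx) (acc ++ [(label, text, paras)]) :=
            (pvStepB_inner mn mx rest' text paras label acc).symm
        _ = ((label, text, paras) :: rest').foldl (pvStepB mn mx) acc := by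
            rw [List.foldl_cons, hstep]

-- ===== VERDICT (by name: the statement is the Claim_ definition above) =====
theorem merge_undersize_py_spec : Claim_equal_merge_undersize_py := by
  intro candidates mn mx _
  unfold Spec_merge_undersize_py merge_undersize_py merge_undersize_py_alt
  exact pvOuterA_eq_foldl mn mx candidates.length candidates [] le_rfl
    (by intro x hx; simp at hx)
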